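-- pv_equiv track=rewrite | github.com/jungchanSon/Algorithm | 프로그래머스/unrated/135808. 과일 장수/과일 장수.py | solution
-- ===== SOURCE A (Python) =====
-- def solution(k, m, score):
--     answer = 0
--     score.sort(reverse=True)
--
--     temp = 0
--     for i in range(0, len(score), m):
--         if len(score) - i < m:
--             break
--         answer += min(score[i: i+m]) * m
--     return answer
-- ===== SOURCE B (Python) =====
-- def solution(k, m, score):
--     # Counting approach: tally multiplicities once, then walk the distinct
--     # values from largest to smallest, tracking the running position `pos`
--     # in the (virtual) descending order.  A value v is the minimum of a full
--     # box of m exactly when a group boundary (a multiple of m) falls inside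
--     # its run, i.e. (pos + c) // m - pos // m times.  No per-group scan,
--     # no slicing; `score` is not mutated (A sorts it in place).
--     cnt = {}
--     for v in score:
--         cnt[v] = cnt.get(v, 0) + 1
--     total = 0
--     pos = 0
--     for v in sorted(cnt, reverse=True):
--         c = cnt[v]
--         total += v * ((pos + c) // m - pos // m)
--         pos += c
--     return total * m
-- ===== Notes on version B (the rewrite author's own statement) =====
-- stated objective: alternative
-- what changed: Replaces A's sort-then-group loop with min() scans by a counting algorithm: build a value->multiplicity dict in one pass, walk the distinct values in descending order keeping a running position, and add v times the number of group boundaries ((pos+c)//m - pos//m) falling inside each run; no grouping, no slicing, no per-group min; B does not mutate score (A sorts it in place).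
-- outside the precondition, e.g. on solution(0, -2, [1, 2, 3]): A returns 0, B returns 8
import Mathlib
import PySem

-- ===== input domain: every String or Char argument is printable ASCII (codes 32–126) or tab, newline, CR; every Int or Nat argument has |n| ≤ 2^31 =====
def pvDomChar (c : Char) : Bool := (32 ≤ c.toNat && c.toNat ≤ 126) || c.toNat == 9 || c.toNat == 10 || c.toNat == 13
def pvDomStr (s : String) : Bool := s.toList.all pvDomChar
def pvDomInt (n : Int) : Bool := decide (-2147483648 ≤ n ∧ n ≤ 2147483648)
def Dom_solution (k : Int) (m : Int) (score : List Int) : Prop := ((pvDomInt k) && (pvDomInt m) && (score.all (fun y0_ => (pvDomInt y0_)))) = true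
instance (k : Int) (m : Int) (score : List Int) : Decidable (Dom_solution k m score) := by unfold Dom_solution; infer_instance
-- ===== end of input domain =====

-- B replaces A's sort + group loop with min() scans by a counting algorithm: a value→multiplicity
-- dict built in one pass, then a walk over the distinct values in descending order adding
-- v * (number of group boundaries inside v's run). Equivalence is about the RETURN value:
-- A sorts `score` in place, B does not mutate it.

-- ===== PORT A =====
-- A's for-loop over range(0, len(score), m) with its break and the running `answer`.
-- Python's min() raises on an empty list; under the break guard the slice has at least
-- one element whenever m ≥ 1, so the `.getD 0` default is never consulted inside Pre_.
def solutionLoop (s : List Int) (m : Int) (acc : Int) : List Int → Int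
  | [] => acc
  | i :: rest =>
      if (s.length : Int) - i < m then acc
      else solutionLoop s m
        (acc + (PySem.List.min? (PySem.List.slice s (some i) (some (i + m))) (fun x => x)).getD 0 * m)
        rest

def solution (k : Int) (m : Int) (score : List Int) : Int :=
  solutionLoop (PySem.List.sorted score (fun x => x) true) m 0
    (PySem.List.pyRange 0 ((PySem.List.sorted score (fun x => x) true).length : Int) m)

-- ===== PORT B =====
-- Source B: build cnt[v] = multiplicity, then for v in sorted(cnt, reverse=True):
--   total += v * ((pos + c) // m - pos // m); pos += c;  return total * m
def solution_alt (k : Int) (m : Int) (score : List Int) : Int :=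
  let cnt : PySem.Dict Int Int :=
    score.foldl (fun d v => d.insert v (d.getD v 0 + 1)) PySem.Dict.empty
  let res : Int × Int :=
    (PySem.List.sorted cnt.keys (fun x => x) true).foldl
      (fun (tp : Int × Int) v =>
        (tp.1 + v * (PySem.Int.floordiv (tp.2 + cnt.getD v 0) m - PySem.Int.floordiv tp.2 m),
         tp.2 + cnt.getD v 0)) (0, 0)
  res.1 * m

-- ===== PRECONDITION & SPEC =====
-- Pre_ restricts to the task's natural domain of positive box sizes: m = 0 raises ValueError
-- in A (range step 0) and ZeroDivisionError in B; for m < 0 a "box of m fruits" is meaningless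
-- (A happens to return 0 there, B's boundary count is not defined for it).
def Pre_solution (k : Int) (m : Int) (score : List Int) : Prop := 1 ≤ m
instance (k : Int) (m : Int) (score : List Int) : Decidable (Pre_solution k m score) := by unfold Pre_solution; infer_instance
def pvWitness_solution : Int × Int × List Int := (0, 2, [4, 1, 3, 2, 5])

def Spec_solution (k : Int) (m : Int) (score : List Int) (out : Int) : Prop := out = solution_alt k m score
instance (k : Int) (m : Int) (score : List Int) (out : Int) : Decidable (Spec_solution k m score out) := by unfold Spec_solution; infer_instance

-- ===== CLAIM (what is proved, stated in full; the proofs are below) =====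
def Claim_equal_solution : Prop := ∀ (k : Int) (m : Int) (score : List Int), Dom_solution k m score → Pre_solution k m score → Spec_solution k m score (solution k m score)

-- ===== LEMMAS AND PROOFS =====

-- range(a, b, st) for 0 < st, a < b peels its first element
lemma pyRange_cons_of_pos {a b st : Int} (hst : 0 < st) (hab : a < b) :
    PySem.List.pyRange a b st = a :: PySem.List.pyRange (a + st) b st := by
  rw [PySem.List.pyRange_of_pos _ _ hst, PySem.List.pyRange_of_pos _ _ hst]
  rw [if_pos hab]
  have hcount : ((b - a + st - 1) / st).toNat
      = (if a + st < b then ((b - (a + st) + st - 1) / st).toNat else 0) + 1 := by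
    have h1 : b - a + st - 1 = (b - a - 1) + 1 * st := by ring
    have h2 : (b - a + st - 1) / st = (b - a - 1) / st + 1 := by
      rw [h1, Int.add_mul_ediv_right _ _ (by omega)]
    by_cases hc : a + st < b
    · rw [if_pos hc]
      have h3 : b - (a + st) + st - 1 = b - a - 1 := by ring
      rw [h3, h2]
      have : 0 ≤ (b - a - 1) / st := Int.ediv_nonneg (by omega) (by omega)
      omega
    · rw [if_neg hc]
      have hle : b - a - 1 < st := by omega
      have : (b - a - 1) / st = 0 := Int.ediv_eq_zero_of_lt (by omega) hle
      rw [h2, this]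
      decide
  rw [hcount, List.range_succ_eq_map]
  simp only [List.map_cons, List.map_map]
  refine List.cons_eq_cons.mpr ⟨by omega, ?_⟩
  apply List.map_congr_left
  intro k _
  simp [Function.comp]
  ring

-- in a descending list the last element is a minimum
lemma getLast_le_of_desc :
    ∀ (l : List Int) (hne : l ≠ []), l.Pairwise (fun a b : Int => b ≤ a) →
      ∀ y ∈ l, l.getLast hne ≤ y := by
  intro l
  induction l with
  | nil => intro h; exact absurd rfl h
  | cons x t ih =>
    intro _ hp y hy
    rcases List.pairwise_cons.mp hp with ⟨hx, ht⟩
    cases t with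
    | nil => simp at hy; simp [hy]
    | cons z t' =>
      have hlast : (x :: z :: t').getLast (by simp) = (z :: t').getLast (by simp) := by
        simp [List.getLast]
      rw [hlast]
      rcases List.mem_cons.mp hy with h | h
      · subst h
        exact le_trans (ih (by simp) ht _ (List.getLast_mem (by simp))) (hx _ (List.getLast_mem (by simp)))
      · exact ih (by simp) ht y h

-- min of a full descending group s[i:i+m] is its last element s[i+m-1]
lemma min_slice_desc (s : List Int) (m i : Int) (hm : 1 ≤ m)
    (hs : s.Pairwise (fun a b : Int => b ≤ a))
    (hi : 0 ≤ i) (hn : i + m ≤ (s.length : Int)) :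
    (PySem.List.min? (PySem.List.slice s (some i) (some (i + m))) (fun x => x)).getD 0
      = PySem.List.pyGetD s (i + m - 1) 0 := by
  have hbounds : i.toNat + m.toNat ≤ s.length := by omega
  rw [PySem.List.slice_toNat s hi (by omega)]
  have htn : (i + m).toNat - i.toNat = m.toNat := by omega
  rw [htn]
  set l := List.take m.toNat (List.drop i.toNat s) with hl
  have hlen : l.length = m.toNat := by
    rw [hl, List.length_take, List.length_drop]; omega
  have hne : l ≠ [] := by
    intro h; rw [h] at hlen; simp at hlen; omega
  have hpl : l.Pairwise (fun a b : Int => b ≤ a) :=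
    hs.sublist ((List.take_sublist _ _).trans (List.drop_sublist _ _))
  obtain ⟨v, hv⟩ : ∃ v, PySem.List.min? l (fun x => x) = some v := by
    cases hmin : PySem.List.min? l (fun x => x) with
    | none => exact absurd ((PySem.List.min?_eq_none_iff _ _).mp hmin) hne
    | some v => exact ⟨v, rfl⟩
  have hvmem : v ∈ l := PySem.List.min?_mem hv
  have hvmin : ∀ y ∈ l, v ≤ y := PySem.List.min?_isMin hv
  have hveq : v = l.getLast hne :=
    le_antisymm (hvmin _ (List.getLast_mem hne)) (getLast_le_of_desc l hne hpl v hvmem)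
  rw [hv, Option.getD_some, hveq]
  have hidx : m.toNat - 1 < l.length := by omega
  rw [List.getLast_eq_getElem, PySem.List.pyGetD_of_nonneg s 0 (by omega)]
  have hidx2 : (i + m - 1).toNat < s.length := by omega
  rw [List.getD_eq_getElem s 0 hidx2]
  simp only [hl]
  rw [List.getElem_take, List.getElem_drop]
  congr 1
  rw [← hl, hlen]
  omega

-- loop invariant: from offset i onwards, A's loop adds m times the sum of the
-- group-minimum positions i+m-1, i+2m-1, …
lemma loopA_eq (s : List Int) (m : Int) (hm : 1 ≤ m)
    (hs : s.Pairwise (fun a b : Int => b ≤ a)) :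
    ∀ (fuel : Nat) (i acc : Int), 0 ≤ i → ((s.length : Int) - i).toNat ≤ fuel →
      solutionLoop s m acc (PySem.List.pyRange i (s.length : Int) m)
        = acc + m * ((PySem.List.pyRange (i + m - 1) (s.length : Int) m).map
            (fun j => PySem.List.pyGetD s j 0)).sum := by
  intro fuel
  induction fuel with
  | zero =>
    intro i acc hi hf
    have hni : (s.length : Int) ≤ i := by omega
    rw [PySem.List.pyRange_of_pos _ _ (by omega), if_neg (by omega)]
    rw [PySem.List.pyRange_of_pos _ _ (by omega), if_neg (by omega)]
    simp [solutionLoop]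
  | succ f ih =>
    intro i acc hi hf
    by_cases hin : (s.length : Int) ≤ i
    · rw [PySem.List.pyRange_of_pos _ _ (by omega), if_neg (by omega)]
      rw [PySem.List.pyRange_of_pos _ _ (by omega), if_neg (by omega)]
      simp [solutionLoop]
    · rw [pyRange_cons_of_pos (a := i) (b := ((s.length : Int))) (st := m) (by omega) (by omega)]
      by_cases hbrk : (s.length : Int) - i < m
      · rw [solutionLoop, if_pos hbrk]
        rw [PySem.List.pyRange_of_pos _ _ (by omega), if_neg (by omega)]
        simp
      · rw [solutionLoop, if_neg hbrk]
        rw [ih (i + m) _ (by omega) (by omega)]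
        rw [pyRange_cons_of_pos (a := i + m - 1) (b := ((s.length : Int))) (st := m) (by omega) (by omega)]
        rw [min_slice_desc s m i hm hs hi (by omega)]
        have : i + m + m - 1 = i + m - 1 + m := by ring
        rw [List.map_cons, List.sum_cons, this]
        ring

-- Hm m s pos = sum of the elements of s sitting (globally) at positions j with m | pos+j+1
def Hm (m : Int) : List Int → Int → Int
  | [], _ => 0
  | x :: t, pos => (if PySem.Int.mod (pos + 1) m = 0 then x else 0) + Hm m t (pos + 1)

-- (pos+1)/m peels one boundary indicator off the floor quotient
lemma ediv_succ (m pos : Int) (hm : 1 ≤ m) :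
    (pos + 1) / m = pos / m + if (pos + 1) % m = 0 then 1 else 0 := by
  by_cases h : (pos + 1) % m = 0
  · rw [if_pos h]
    obtain ⟨q, hq⟩ := Int.dvd_of_emod_eq_zero h
    have h1 : (pos + 1) / m = q := by rw [hq]; exact Int.mul_ediv_cancel_left q (by omega)
    have h2 : pos = (m - 1) + (q - 1) * m := by
      have : (m - 1) + (q - 1) * m = m * q - 1 := by ring
      omega
    have h3 : pos / m = q - 1 := by
      rw [h2, Int.add_mul_ediv_right _ _ (by omega : m ≠ 0),
        Int.ediv_eq_zero_of_lt (by omega) (by omega)]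
      omega
    omega
  · rw [if_neg h]
    have he := Int.ediv_add_emod pos m
    have hnn : 0 ≤ pos % m := Int.emod_nonneg pos (by omega)
    have hlt : pos % m < m := Int.emod_lt_of_pos pos (by omega)
    have hne : pos % m + 1 ≠ m := by
      intro hc
      apply h
      have h1 : pos + 1 = m * (pos / m + 1) := by
        have : m * (pos / m + 1) = m * (pos / m) + m := by ring
        omega
      rw [h1]
      exact Int.mul_emod_right m (pos / m + 1)
    have h1 : pos + 1 = (pos % m + 1) + (pos / m) * m := by
      have : (pos / m) * m = m * (pos / m) := by ring
      omega
    rw [h1, Int.add_mul_ediv_right _ _ (by omega : m ≠ 0),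
      Int.ediv_eq_zero_of_lt (by omega) (by omega)]
    omega

-- each step of pos peels one boundary indicator off x * (floordiv difference)
lemma Hm_replicate_append (m x : Int) (hm : 1 ≤ m) (u : List Int) :
    ∀ (c : Nat) (pos : Int),
      Hm m (List.replicate c x ++ u) pos
        = x * (PySem.Int.floordiv (pos + (c : Int)) m - PySem.Int.floordiv pos m)
            + Hm m u (pos + (c : Int)) := by
  intro c
  induction c with
  | zero => intro pos; simp
  | succ d ih =>
    intro pos
    rw [List.replicate_succ, List.cons_append]
    simp only [Hm]
    rw [ih (pos + 1)]
    have hfd : PySem.Int.floordiv (pos + 1) m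
        = PySem.Int.floordiv pos m + (if PySem.Int.mod (pos + 1) m = 0 then 1 else 0) := by
      rw [PySem.Int.floordiv_eq_ediv_of_pos (by omega),
        PySem.Int.floordiv_eq_ediv_of_pos (by omega),
        PySem.Int.mod_eq_emod_of_pos (by omega), ediv_succ m pos hm]
    have harg : pos + 1 + (d : Int) = pos + ((d : Int) + 1) := by ring
    have hcast : (((d + 1 : Nat)) : Int) = (d : Int) + 1 := by push_cast; ring
    rw [harg, hcast, hfd]
    split_ifs <;> ring

-- shifting a positive-step range by one
lemma pyRange_shift (m a n : Int) (hm : 0 < m) :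
    PySem.List.pyRange (a + 1) (n + 1) m = (PySem.List.pyRange a n m).map (· + 1) := by
  rw [PySem.List.pyRange_of_pos _ _ hm, PySem.List.pyRange_of_pos _ _ hm]
  by_cases h : a < n
  · rw [if_pos (by omega), if_pos h]
    have he : n + 1 - (a + 1) + m - 1 = n - a + m - 1 := by ring
    rw [he, List.map_map]
    apply List.map_congr_left
    intro x _
    simp only [Function.comp]
    ring
  · rw [if_neg (by omega), if_neg h]; simp

-- the indexed sum over a shifted range drops the head element
lemma sum_pyGetD_shift (m : Int) (hm : 0 < m) (x : Int) (t : List Int) (a : Int) (ha : 0 ≤ a) :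
    ((PySem.List.pyRange (a + 1) ((t.length : Int) + 1) m).map
        (fun j => PySem.List.pyGetD (x :: t) j 0)).sum
      = ((PySem.List.pyRange a (t.length : Int) m).map (fun j => PySem.List.pyGetD t j 0)).sum := by
  rw [pyRange_shift m a _ hm, List.map_map]
  apply congrArg List.sum
  apply List.map_congr_left
  intro j hj
  have hj' := (PySem.List.mem_pyRange_iff_of_pos hm j).mp hj
  simp only [Function.comp]
  rw [PySem.List.pyGetD_of_nonneg _ _ (by omega), PySem.List.pyGetD_of_nonneg _ _ (by omega)]
  have h1 : (j + 1).toNat = j.toNat + 1 := by omega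
  rw [h1]
  simp [List.getD]

-- A's group-end sum over range(m-1-pos%m, len(s), m) is Hm
lemma sum_range_eq_Hm (m : Int) (hm : 1 ≤ m) :
    ∀ (s : List Int) (pos : Int), 0 ≤ pos →
      ((PySem.List.pyRange (m - 1 - PySem.Int.mod pos m) (s.length : Int) m).map
          (fun j => PySem.List.pyGetD s j 0)).sum = Hm m s pos := by
  intro s
  induction s with
  | nil =>
    intro pos hpos
    have h1 : PySem.Int.mod pos m < m := PySem.Int.mod_lt _ (by omega)
    have h2 : 0 ≤ PySem.Int.mod pos m := PySem.Int.mod_nonneg _ (by omega)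
    rw [PySem.List.pyRange_of_pos _ _ (by omega)]
    rw [if_neg (by simp only [List.length_nil, Nat.cast_zero]; omega)]
    simp [Hm]
  | cons x t ih =>
    intro pos hpos
    have h1 : PySem.Int.mod pos m < m := PySem.Int.mod_lt _ (by omega)
    have h2 : 0 ≤ PySem.Int.mod pos m := PySem.Int.mod_nonneg _ (by omega)
    have hemod : PySem.Int.mod pos m = pos % m := PySem.Int.mod_eq_emod_of_pos (by omega)
    have he := Int.ediv_add_emod pos m
    have hlen : ((x :: t).length : Int) = (t.length : Int) + 1 := by simp
    by_cases hr : PySem.Int.mod pos m = m - 1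
    · have hstart : m - 1 - PySem.Int.mod pos m = 0 := by omega
      have hmod1 : PySem.Int.mod (pos + 1) m = 0 := by
        rw [PySem.Int.mod_eq_emod_of_pos (by omega)]
        have hp1 : pos + 1 = m * (pos / m + 1) := by
          have : m * (pos / m + 1) = m * (pos / m) + m := by ring
          omega
        rw [hp1]
        exact Int.mul_emod_right _ _
      rw [hstart]
      rw [pyRange_cons_of_pos (by omega) (by rw [hlen]; omega)]
      rw [List.map_cons, List.sum_cons]
      have hx0 : PySem.List.pyGetD (x :: t) 0 0 = x := by
        rw [PySem.List.pyGetD_of_nonneg _ _ le_rfl]; rfl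
      have hm1 : (0 : Int) + m = (m - 1) + 1 := by ring
      rw [hx0, hm1, hlen, sum_pyGetD_shift m (by omega) x t (m - 1) (by omega)]
      have ihh := ih (pos + 1) (by omega)
      rw [hmod1, sub_zero] at ihh
      simp only [Hm]
      rw [if_pos hmod1, ihh]
    · have hr1 : 1 ≤ m - 1 - PySem.Int.mod pos m := by omega
      have hmod1 : PySem.Int.mod (pos + 1) m = PySem.Int.mod pos m + 1 := by
        have hb1 : 0 ≤ pos % m := by omega
        have hb2 : pos % m + 1 < m := by omega
        have hp1 : pos + 1 = (pos % m + 1) + m * (pos / m) := by omega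
        rw [PySem.Int.mod_eq_emod_of_pos (by omega), hemod, hp1, Int.add_mul_emod_self_left]
        exact Int.emod_eq_of_lt (by omega) (by omega)
      have hsplit : m - 1 - PySem.Int.mod pos m = (m - 1 - PySem.Int.mod (pos + 1) m) + 1 := by omega
      rw [hlen, hsplit, sum_pyGetD_shift m (by omega) x t _ (by omega)]
      simp only [Hm]
      rw [if_neg (by omega), ih (pos + 1) (by omega)]
      ring

-- Set.add on a list headed by a different element keeps the head
lemma set_add_cons (v x : Int) (s : List Int) (hx : x ≠ v) :
    PySem.Set.add (v :: s) x = v :: PySem.Set.add s x := by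
  by_cases h : x ∈ s
  · simp [PySem.Set.add, PySem.Set.contains, hx, h]
  · simp [PySem.Set.add, PySem.Set.contains, hx, h]

lemma foldl_set_add_cons (v : Int) :
    ∀ (t s : List Int), v ∉ t → t.foldl PySem.Set.add (v :: s) = v :: t.foldl PySem.Set.add s := by
  intro t
  induction t with
  | nil => intro s _; rfl
  | cons x t' ih =>
    intro s hv
    have hx : x ≠ v := fun h => hv (by simp [h])
    rw [List.foldl_cons, List.foldl_cons, set_add_cons v x s hx, ih _ (fun h => hv (by simp [h]))]

lemma foldl_set_add_replicate (v : Int) :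
    ∀ (d : Nat), (List.replicate d v).foldl PySem.Set.add [v] = [v] := by
  intro d
  induction d with
  | zero => rfl
  | succ d ih =>
    rw [List.replicate_succ, List.foldl_cons]
    have h : PySem.Set.add [v] v = [v] := by simp [PySem.Set.add, PySem.Set.contains]
    rw [h, ih]

-- set() of a maximal run followed by the rest
lemma ofList_replicate_append (v : Int) (c : Nat) (t : List Int) (hv : v ∉ t) :
    PySem.Set.ofList (List.replicate (c + 1) v ++ t) = v :: PySem.Set.ofList t := by
  rw [PySem.Set.ofList_eq_foldl, PySem.Set.ofList_eq_foldl]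
  rw [List.replicate_succ, List.cons_append, List.foldl_cons]
  have h1 : PySem.Set.add ([] : List Int) v = [v] := by simp [PySem.Set.add, PySem.Set.contains]
  rw [h1, List.foldl_append, foldl_set_add_replicate v c, foldl_set_add_cons v t [] hv]

-- set(xs) keeps first occurrences in order: a sublist of xs
lemma ofList_sublist : ∀ (xs : List Int), List.Sublist (PySem.Set.ofList xs) xs := by
  intro xs
  induction xs using List.reverseRecOn with
  | nil => simp [PySem.Set.ofList_eq_foldl]
  | append_singleton ys y ih =>
    rw [PySem.Set.ofList_eq_foldl, List.foldl_append, List.foldl_cons, List.foldl_nil,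
      ← PySem.Set.ofList_eq_foldl]
    by_cases h : y ∈ ys
    · rw [show PySem.Set.add (PySem.Set.ofList ys) y = PySem.Set.ofList ys from by
        simp [PySem.Set.add, PySem.Set.contains, PySem.Set.mem_ofList, h]]
      exact ih.trans (List.sublist_append_left ys [y])
    · rw [show PySem.Set.add (PySem.Set.ofList ys) y = PySem.Set.ofList ys ++ [y] from by
        simp [PySem.Set.add, PySem.Set.contains, PySem.Set.mem_ofList, h]]
      exact List.Sublist.append ih (List.Sublist.refl [y])

-- a nonempty descending list starts with the maximal run of its head
lemma desc_run (x : Int) :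
    ∀ (t : List Int), (x :: t).Pairwise (fun a b : Int => b ≤ a) →
      ∃ (c : Nat) (u : List Int), x :: t = List.replicate (c + 1) x ++ u ∧ x ∉ u ∧
        u.Pairwise (fun a b : Int => b ≤ a) ∧ (x :: t).count x = c + 1 := by
  intro t
  induction t with
  | nil => exact fun _ => ⟨0, [], by simp, by simp, by simp, by simp⟩
  | cons y t' ih =>
    intro hp
    rcases List.pairwise_cons.mp hp with ⟨hx, hyt⟩
    by_cases hxy : y = x
    · subst hxy
      obtain ⟨c, u, h1, h2, h3, h4⟩ := ih hyt
      refine ⟨c + 1, u, ?_, h2, h3, ?_⟩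
      · rw [List.replicate_succ, List.cons_append, ← h1]
      · rw [List.count_cons_self, h4]
    · have hyx : y ≤ x := hx y (by simp)
      have hnotin : x ∉ y :: t' := by
        intro hmem
        rcases List.mem_cons.mp hmem with h | h
        · exact hxy h.symm
        · exact hxy (le_antisymm hyx ((List.pairwise_cons.mp hyt).1 x h))
      refine ⟨0, y :: t', by simp, hnotin, hyt, ?_⟩
      rw [List.count_cons_self, List.count_eq_zero_of_not_mem hnotin]

-- B's fold over the distinct values of a descending list computes Hm
lemma run_fold (m : Int) (hm : 1 ≤ m) :
    ∀ (N : Nat) (s : List Int), s.length ≤ N → s.Pairwise (fun a b : Int => b ≤ a) →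
      ∀ (total pos : Int), 0 ≤ pos →
        (PySem.Set.ofList s).foldl
          (fun (tp : Int × Int) v =>
            (tp.1 + v * (PySem.Int.floordiv (tp.2 + (s.count v : Int)) m
                - PySem.Int.floordiv tp.2 m),
             tp.2 + (s.count v : Int))) (total, pos)
        = (total + Hm m s pos, pos + (s.length : Int)) := by
  intro N
  induction N with
  | zero =>
    intro s hlen _ total pos _
    cases s with
    | nil => simp [PySem.Set.ofList_eq_foldl, Hm]
    | cons x t => simp at hlen
  | succ n ih =>
    intro s hlen hp total pos hpos
    cases s with
    | nil => simp [PySem.Set.ofList_eq_foldl, Hm]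
    | cons x t =>
      obtain ⟨c, u, h1, h2, h3, h4⟩ := desc_run x t hp
      have hlenu : (x :: t).length = (c + 1) + u.length := by
        rw [h1]; simp
      have hofl : PySem.Set.ofList (x :: t) = x :: PySem.Set.ofList u := by
        rw [h1]; exact ofList_replicate_append x c u h2
      have hcx : ((x :: t).count x : Int) = (c : Int) + 1 := by
        rw [h4]; push_cast; ring
      rw [hofl, List.foldl_cons]
      have hcong : ∀ (acc : Int × Int), ∀ v ∈ PySem.Set.ofList u,
          (fun (tp : Int × Int) v =>
            (tp.1 + v * (PySem.Int.floordiv (tp.2 + ((x :: t).count v : Int)) m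
                - PySem.Int.floordiv tp.2 m),
             tp.2 + ((x :: t).count v : Int))) acc v
          = (fun (tp : Int × Int) v =>
            (tp.1 + v * (PySem.Int.floordiv (tp.2 + (u.count v : Int)) m
                - PySem.Int.floordiv tp.2 m),
             tp.2 + (u.count v : Int))) acc v := by
        intro acc v hv
        have hvu : v ∈ u := (PySem.Set.mem_ofList u v).mp hv
        have hvx : ¬ (v = x) := fun h => h2 (h ▸ hvu)
        have hcv : (x :: t).count v = u.count v := by
          rw [h1, List.count_append, List.count_replicate]
          simp [Ne.symm hvx]
        dsimp only
        rw [hcv]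
      rw [PySem.List.foldl_congr_mem _ _ _ _ hcong]
      simp only [hcx]
      rw [ih u (by omega) h3 _ (pos + ((c : Int) + 1)) (by omega)]
      have hHm : Hm m (x :: t) pos
          = x * (PySem.Int.floordiv (pos + ((c : Int) + 1)) m - PySem.Int.floordiv pos m)
              + Hm m u (pos + ((c : Int) + 1)) := by
        rw [h1, Hm_replicate_append m x hm u (c + 1) pos]
        push_cast
        ring_nf
      rw [hHm]
      have hlen2 : ((x :: t).length : Int) = ((c : Int) + 1) + (u.length : Int) := by
        rw [hlenu]; push_cast; ring
      rw [hlen2]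
      refine Prod.ext ?_ ?_ <;> simp <;> ring

-- sorting the distinct values descending = taking first occurrences of the descending sort
lemma sorted_keys_eq (score : List Int) :
    PySem.List.sorted (PySem.Set.ofList score) (fun x => x) true
      = PySem.Set.ofList (PySem.List.sorted score (fun x => x) true) := by
  apply PySem.List.eq_of_perm_of_pairwise_le_of_injective (key := fun x : Int => -x) neg_injective
  · refine (PySem.List.sorted_perm _ _ _).trans ?_
    rw [List.perm_ext_iff_of_nodup (PySem.Set.nodup_ofList _) (PySem.Set.nodup_ofList _)]
    intro a
    rw [PySem.Set.mem_ofList, PySem.Set.mem_ofList, PySem.List.mem_sorted]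
  · exact (PySem.List.sorted_pairwise_rev _ _).imp (fun h => by omega)
  · exact ((PySem.List.sorted_pairwise_rev score (fun x => x)).sublist
      (ofList_sublist _)).imp (fun h => by omega)

-- ===== VERDICT (by name: the statement is the Claim_ definition above) =====
theorem solution_spec : Claim_equal_solution := by
  intro k m score _ hpre
  have hm : (1 : Int) ≤ m := hpre
  unfold Spec_solution solution solution_alt
  dsimp only
  set s := PySem.List.sorted score (fun x => x) true with hsdef
  have hs : s.Pairwise (fun a b : Int => b ≤ a) :=
    PySem.List.sorted_pairwise_rev score (fun x => x)
  rw [loopA_eq s m hm hs (((s.length : Int) - 0).toNat) 0 0 le_rfl le_rfl]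
  have hz : (0 : Int) + m - 1 = m - 1 - PySem.Int.mod 0 m := by
    rw [PySem.Int.mod_eq_emod_of_pos (by omega)]
    simp
  rw [hz, sum_range_eq_Hm m hm s 0 le_rfl]
  simp only [PySem.Dict.foldl_insert_getD_add_one_eq_counter, PySem.Dict.getD_counter,
    PySem.Dict.keys_counter]
  rw [sorted_keys_eq score, ← hsdef]
  have hcong : ∀ (acc : Int × Int), ∀ v ∈ PySem.Set.ofList s,
      (fun (tp : Int × Int) v =>
        (tp.1 + v * (PySem.Int.floordiv (tp.2 + (score.count v : Int)) m
            - PySem.Int.floordiv tp.2 m),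
         tp.2 + (score.count v : Int))) acc v
      = (fun (tp : Int × Int) v =>
        (tp.1 + v * (PySem.Int.floordiv (tp.2 + (s.count v : Int)) m
            - PySem.Int.floordiv tp.2 m),
         tp.2 + (s.count v : Int))) acc v := by
    intro acc v _
    have hc : s.count v = score.count v := (PySem.List.sorted_perm score _ true).count_eq v
    dsimp only
    rw [hc]
  rw [PySem.List.foldl_congr_mem _ _ _ _ hcong]
  rw [run_fold m hm s.length s le_rfl hs 0 0 le_rfl]
  ring
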